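-- pv_equiv track=rewrite | github.com/Aayushmaan-shukla/scrapingscripts | enhanced_jiomart_scraper_comprehensive.py | determine_offer_type
-- ===== SOURCE A (Python) =====
-- def determine_offer_type(card_title: str, description: str) -> str:
--     """Determine offer type based on card title and description."""
--     card_title_lower = card_title.lower() if card_title else ""
--     description_lower = description.lower() if description else ""
--
--     # Enhanced type detection for JioMart
--     if any(keyword in card_title_lower for keyword in ['bank offer', 'instant discount', 'card offer']):
--         return "Bank Offer"
--     elif any(keyword in card_title_lower for keyword in ['no cost emi', 'no-cost emi', 'emi']):
--         return "No Cost EMI"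
--     elif any(keyword in card_title_lower for keyword in ['cashback', 'cash back']):
--         return "Cashback"
--     elif any(keyword in card_title_lower for keyword in ['exchange offer', 'exchange']):
--         return "Exchange Offer"
--     elif any(keyword in card_title_lower for keyword in ['partner offer', 'partner']):
--         return "Partner Offers"
--     elif any(keyword in description_lower for keyword in ['bank', 'credit card', 'debit card']):
--         return "Bank Offer"  # Fallback for bank-related offers
--     elif any(keyword in description_lower for keyword in ['emi', 'no cost']):
--         return "No Cost EMI"
--     else:
--         return card_title if card_title else "JioMart Offer"
-- ===== SOURCE B (Python) =====
-- # Flat keyword index: every keyword carries (priority, field, label); we score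
-- # all matches and return the label of the minimum priority, instead of an
-- # ordered first-match if/elif chain.
-- KEYWORDS = [
--     ('bank offer', 0, True, 'Bank Offer'),
--     ('instant discount', 0, True, 'Bank Offer'),
--     ('card offer', 0, True, 'Bank Offer'),
--     ('no cost emi', 1, True, 'No Cost EMI'),
--     ('no-cost emi', 1, True, 'No Cost EMI'),
--     ('emi', 1, True, 'No Cost EMI'),
--     ('cashback', 2, True, 'Cashback'),
--     ('cash back', 2, True, 'Cashback'),
--     ('exchange offer', 3, True, 'Exchange Offer'),
--     ('exchange', 3, True, 'Exchange Offer'),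
--     ('partner offer', 4, True, 'Partner Offers'),
--     ('partner', 4, True, 'Partner Offers'),
--     ('bank', 5, False, 'Bank Offer'),
--     ('credit card', 5, False, 'Bank Offer'),
--     ('debit card', 5, False, 'Bank Offer'),
--     ('emi', 6, False, 'No Cost EMI'),
--     ('no cost', 6, False, 'No Cost EMI'),
-- ]
--
--
-- def determine_offer_type(card_title: str, description: str) -> str:
--     """Determine offer type based on card title and description."""
--     title = card_title.lower() if card_title else ""
--     desc = description.lower() if description else ""
--     best = None
--     for kw, prio, in_title, label in KEYWORDS:
--         if (best is None or prio < best[0]) and kw in (title if in_title else desc):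
--             best = (prio, label)
--     if best is not None:
--         return best[1]
--     return card_title if card_title else "JioMart Offer"
-- ===== Notes on version B (the rewrite author's own statement) =====
-- stated objective: alternative
-- what changed: Replaces the ordered if/elif first-match chain by a flat keyword index where every keyword carries a (priority, field, label); a single loop scores all matching keywords and returns the label of the minimum priority, with the same fallback.
import Mathlib
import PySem

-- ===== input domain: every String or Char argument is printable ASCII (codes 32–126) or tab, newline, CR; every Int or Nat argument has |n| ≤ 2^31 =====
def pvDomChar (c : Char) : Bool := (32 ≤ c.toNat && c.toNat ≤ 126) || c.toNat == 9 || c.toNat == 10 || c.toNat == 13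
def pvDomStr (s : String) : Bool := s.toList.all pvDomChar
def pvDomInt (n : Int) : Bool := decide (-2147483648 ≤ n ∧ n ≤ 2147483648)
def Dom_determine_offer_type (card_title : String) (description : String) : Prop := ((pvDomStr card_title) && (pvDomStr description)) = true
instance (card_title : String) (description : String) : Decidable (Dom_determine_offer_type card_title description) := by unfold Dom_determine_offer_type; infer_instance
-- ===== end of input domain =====

-- B replaces A's ordered first-match if/elif chain by a flat keyword index scored
-- with min-priority selection (objective: alternative decomposition, same cost).

-- ===== PORT A =====
def determine_offer_type (card_title : String) (description : String) : String :=
  let card_title_lower := if card_title == "" then "" else PySem.Str.lower card_title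
  let description_lower := if description == "" then "" else PySem.Str.lower description
  if ["bank offer", "instant discount", "card offer"].any (fun keyword => PySem.Str.isIn keyword card_title_lower) then
    "Bank Offer"
  else if ["no cost emi", "no-cost emi", "emi"].any (fun keyword => PySem.Str.isIn keyword card_title_lower) then
    "No Cost EMI"
  else if ["cashback", "cash back"].any (fun keyword => PySem.Str.isIn keyword card_title_lower) then
    "Cashback"
  else if ["exchange offer", "exchange"].any (fun keyword => PySem.Str.isIn keyword card_title_lower) then
    "Exchange Offer"
  else if ["partner offer", "partner"].any (fun keyword => PySem.Str.isIn keyword card_title_lower) then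
    "Partner Offers"
  else if ["bank", "credit card", "debit card"].any (fun keyword => PySem.Str.isIn keyword description_lower) then
    "Bank Offer"
  else if ["emi", "no cost"].any (fun keyword => PySem.Str.isIn keyword description_lower) then
    "No Cost EMI"
  else if card_title == "" then "JioMart Offer" else card_title

-- ===== PORT B =====
-- Source B's flat keyword index: (keyword, priority, field-is-title, label)
def pvKeywords : List (String × Nat × Bool × String) :=
  [ ("bank offer", 0, true, "Bank Offer"),
    ("instant discount", 0, true, "Bank Offer"),
    ("card offer", 0, true, "Bank Offer"),
    ("no cost emi", 1, true, "No Cost EMI"),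
    ("no-cost emi", 1, true, "No Cost EMI"),
    ("emi", 1, true, "No Cost EMI"),
    ("cashback", 2, true, "Cashback"),
    ("cash back", 2, true, "Cashback"),
    ("exchange offer", 3, true, "Exchange Offer"),
    ("exchange", 3, true, "Exchange Offer"),
    ("partner offer", 4, true, "Partner Offers"),
    ("partner", 4, true, "Partner Offers"),
    ("bank", 5, false, "Bank Offer"),
    ("credit card", 5, false, "Bank Offer"),
    ("debit card", 5, false, "Bank Offer"),
    ("emi", 6, false, "No Cost EMI"),
    ("no cost", 6, false, "No Cost EMI") ]

-- one iteration of Source B's loop: keep the best (minimum-priority) match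
def pvStep (title desc : String) (best : Option (Nat × String)) (e : String × Nat × Bool × String) : Option (Nat × String) :=
  let (kw, prio, in_title, label) := e
  if (match best with | none => true | some b => decide (prio < b.1)) &&
     PySem.Str.isIn kw (if in_title then title else desc) then
    some (prio, label)
  else best

def determine_offer_type_alt (card_title : String) (description : String) : String :=
  let title := if card_title == "" then "" else PySem.Str.lower card_title
  let desc := if description == "" then "" else PySem.Str.lower description
  match pvKeywords.foldl (pvStep title desc) none with
  | some b => b.2
  | none => if card_title == "" then "JioMart Offer" else card_title

-- ===== PRECONDITION & SPEC =====
def Spec_determine_offer_type (card_title : String) (description : String) (out : String) : Prop := out = determine_offer_type_alt card_title description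
instance (card_title : String) (description : String) (out : String) : Decidable (Spec_determine_offer_type card_title description out) := by unfold Spec_determine_offer_type; infer_instance

-- ===== CLAIM (what is proved, stated in full; the proofs are below) =====
def Claim_equal_determine_offer_type : Prop := ∀ (card_title : String) (description : String), Dom_determine_offer_type card_title description → Spec_determine_offer_type card_title description (determine_offer_type card_title description)

-- ===== LEMMAS AND PROOFS =====

-- ===== VERDICT (by name: the statement is the Claim_ definition above) =====
set_option maxHeartbeats 4000000 in
theorem determine_offer_type_spec : Claim_equal_determine_offer_type := by
  intro card_title description _
  unfold Spec_determine_offer_type determine_offer_type determine_offer_type_alt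
  dsimp only
  generalize (if card_title == "" then "" else PySem.Str.lower card_title) = t
  generalize (if description == "" then "" else PySem.Str.lower description) = d
  generalize (if card_title == "" then "JioMart Offer" else card_title) = f
  by_cases h1 : PySem.Str.isIn "bank offer" t = true
  · simp_all [pvKeywords, pvStep]
  · simp only [Bool.not_eq_true] at h1
    by_cases h2 : PySem.Str.isIn "instant discount" t = true
    · simp_all [pvKeywords, pvStep]
    · simp only [Bool.not_eq_true] at h2
      by_cases h3 : PySem.Str.isIn "card offer" t = true
      · simp_all [pvKeywords, pvStep]
      · simp only [Bool.not_eq_true] at h3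
        by_cases h4 : PySem.Str.isIn "no cost emi" t = true
        · simp_all [pvKeywords, pvStep]
        · simp only [Bool.not_eq_true] at h4
          by_cases h5 : PySem.Str.isIn "no-cost emi" t = true
          · simp_all [pvKeywords, pvStep]
          · simp only [Bool.not_eq_true] at h5
            by_cases h6 : PySem.Str.isIn "emi" t = true
            · simp_all [pvKeywords, pvStep]
            · simp only [Bool.not_eq_true] at h6
              by_cases h7 : PySem.Str.isIn "cashback" t = true
              · simp_all [pvKeywords, pvStep]
              · simp only [Bool.not_eq_true] at h7
                by_cases h8 : PySem.Str.isIn "cash back" t = true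
                · simp_all [pvKeywords, pvStep]
                · simp only [Bool.not_eq_true] at h8
                  by_cases h9 : PySem.Str.isIn "exchange offer" t = true
                  · simp_all [pvKeywords, pvStep]
                  · simp only [Bool.not_eq_true] at h9
                    by_cases h10 : PySem.Str.isIn "exchange" t = true
                    · simp_all [pvKeywords, pvStep]
                    · simp only [Bool.not_eq_true] at h10
                      by_cases h11 : PySem.Str.isIn "partner offer" t = true
                      · simp_all [pvKeywords, pvStep]
                      · simp only [Bool.not_eq_true] at h11
                        by_cases h12 : PySem.Str.isIn "partner" t = true
                        · simp_all [pvKeywords, pvStep]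
                        · simp only [Bool.not_eq_true] at h12
                          by_cases h13 : PySem.Str.isIn "bank" d = true
                          · simp_all [pvKeywords, pvStep]
                          · simp only [Bool.not_eq_true] at h13
                            by_cases h14 : PySem.Str.isIn "credit card" d = true
                            · simp_all [pvKeywords, pvStep]
                            · simp only [Bool.not_eq_true] at h14
                              by_cases h15 : PySem.Str.isIn "debit card" d = true
                              · simp_all [pvKeywords, pvStep]
                              · simp only [Bool.not_eq_true] at h15
                                by_cases h16 : PySem.Str.isIn "emi" d = true
                                · simp_all [pvKeywords, pvStep]
                                · simp only [Bool.not_eq_true] at h16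
                                  by_cases h17 : PySem.Str.isIn "no cost" d = true
                                  · simp_all [pvKeywords, pvStep]
                                  · simp only [Bool.not_eq_true] at h17
                                    simp_all [pvKeywords, pvStep]
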